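-- pv_equiv track=rewrite | github.com/Pointsh/NLP | codingtest.py | solution
-- ===== SOURCE A (Python) =====
-- def solution(s):
--     equl=0
--     n_equl=0
--     char=''
--     result=0
--     for i in s:
--         if equl==n_equl:
--             result+=1
--             char=i
--         if i==char:
--             equl+=1
--         else:
--             n_equl+=1
--     return result
-- ===== SOURCE B (Python) =====
-- def solution(s):
--     rest = s
--     result = 0
--     while rest:
--         result += 1
--         ch = rest[0]
--         eq = 0
--         ne = 0
--         k = 0
--         for c in rest:
--             if c == ch:
--                 eq += 1
--             else:
--                 ne += 1
--             k += 1
--             if eq == ne: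
--                 break
--         rest = rest[k:]
--     return result
-- ===== Notes on version B (the rewrite author's own statement) =====
-- stated objective: alternative
-- what changed: B replaces A's single flat pass with cumulative never-reset counters by explicit greedy segmentation: an outer loop per segment, an inner scan with fresh per-segment counters that breaks when they become equal, then advancing past the consumed segment.
import Mathlib
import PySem

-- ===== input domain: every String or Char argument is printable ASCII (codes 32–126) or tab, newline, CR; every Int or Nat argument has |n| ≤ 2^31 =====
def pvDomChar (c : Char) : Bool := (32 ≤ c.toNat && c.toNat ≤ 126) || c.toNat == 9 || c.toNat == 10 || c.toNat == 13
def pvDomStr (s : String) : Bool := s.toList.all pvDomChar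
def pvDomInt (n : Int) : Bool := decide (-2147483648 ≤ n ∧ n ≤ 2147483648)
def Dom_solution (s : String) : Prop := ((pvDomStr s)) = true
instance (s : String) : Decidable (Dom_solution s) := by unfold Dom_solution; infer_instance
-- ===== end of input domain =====

-- B recomputes A's answer by explicit greedy segmentation (outer loop per segment, fresh
-- per-segment counters) instead of A's flat pass with cumulative counters; objective: alternative.

-- ===== PORT A =====
-- One fold over the characters with state (equl, n_equl, char, result).
-- Python's initial char='' is never consulted (the first iteration has equl==n_equl and
-- overwrites char before the comparison), so any initial Char (here ' ') is exact.
def stepA (st : Int × Int × Char × Int) (i : Char) : Int × Int × Char × Int :=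
  let (equl, n_equl, char, result) := st
  let (result, char) := if equl = n_equl then (result + 1, i) else (result, char)
  if i = char then (equl + 1, n_equl, char, result) else (equl, n_equl + 1, char, result)

def solution (s : String) : Int :=
  (s.toList.foldl stepA (0, 0, ' ', 0)).2.2.2

-- ===== PORT B =====
-- inner while loop of Source B: number k of characters consumed (stops right after eq == ne)
def segLen (ch : Char) (l : List Char) (eq ne : Int) : Nat :=
  match l with
  | [] => 0
  | c :: rest =>
    let eq' := if c = ch then eq + 1 else eq
    let ne' := if c = ch then ne else ne + 1
    if eq' = ne' then 1 else 1 + segLen ch rest eq' ne'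

theorem segLen_pos (ch : Char) (c : Char) (rest : List Char) (eq ne : Int) :
    1 ≤ segLen ch (c :: rest) eq ne := by
  rw [segLen]
  split_ifs <;> omega

-- outer while loop of Source B: rest = rest[k:] each round
def outerB (l : List Char) (r : Int) : Int :=
  match h : l with
  | [] => r
  | c :: rest => outerB (l.drop (segLen c l 0 0)) (r + 1)
termination_by l.length
decreasing_by
  simp only [List.length_drop]
  have := segLen_pos c c rest 0 0
  subst h
  simp only [List.length_cons]
  omega

def solution_alt (s : String) : Int := outerB s.toList 0

-- ===== PRECONDITION & SPEC =====
def Spec_solution (s : String) (out : Int) : Prop := out = solution_alt s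
instance (s : String) (out : Int) : Decidable (Spec_solution s out) := by unfold Spec_solution; infer_instance

-- ===== CLAIM (what is proved, stated in full; the proofs are below) =====
def Claim_equal_solution : Prop := ∀ (s : String), Dom_solution s → Spec_solution s (solution s)

-- ===== LEMMAS AND PROOFS =====

-- A's result component after folding the remaining characters, in two regimes:
-- balanced state (equl = n_equl, a segment starts at the next char) ↔ outerB;
-- unbalanced mid-segment state with char c ↔ skip segLen-many chars, then outerB.
theorem main_lemma (l : List Char) :
    (∀ (e n : Int) (c : Char) (r : Int), e = n →
        (l.foldl stepA (e, n, c, r)).2.2.2 = outerB l r) ∧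
    (∀ (e n : Int) (c : Char) (r : Int) (eq ne : Int), e - n = eq - ne → e ≠ n →
        (l.foldl stepA (e, n, c, r)).2.2.2 = outerB (l.drop (segLen c l eq ne)) r) := by
  induction l with
  | nil =>
      constructor
      · intro e n c r _; simp [outerB]
      · intro e n c r eq ne _ _; simp [segLen, outerB]
  | cons i rest ih =>
      obtain ⟨ih1, ih2⟩ := ih
      constructor
      · intro e n c r he
        -- A starts a new segment: result+1, char := i, then i = char so equl+1
        have hstep : stepA (e, n, c, r) i = (e + 1, n, i, r + 1) := by
          simp [stepA, he]
        rw [List.foldl_cons, hstep]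
        -- B: segLen i (i::rest) 0 0 = 1 + segLen i rest 1 0
        have hseg : segLen i (i :: rest) 0 0 = 1 + segLen i rest 1 0 := by
          simp [segLen]
        rw [outerB]
        rw [hseg]
        have hdrop : (i :: rest).drop (1 + segLen i rest 1 0) = rest.drop (segLen i rest 1 0) := by
          simp [Nat.add_comm, List.drop_succ_cons]
        rw [hdrop]
        exact ih2 (e + 1) n i (r + 1) 1 0 (by omega) (by omega)
      · intro e n c r eq ne hd hne
        rw [List.foldl_cons]
        have hstep : stepA (e, n, c, r) i =
            if i = c then (e + 1, n, c, r) else (e, n + 1, c, r) := by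
          simp [stepA, hne]
        rw [hstep]
        by_cases hic : i = c
        · -- equl += 1, eq += 1
          subst hic
          rw [if_pos rfl]
          have hseg : segLen i (i :: rest) eq ne =
              if eq + 1 = ne then 1 else 1 + segLen i rest (eq + 1) ne := by
            simp [segLen]
          by_cases heq : eq + 1 = ne
          · -- new diff is e+1-n = eq+1-ne = 0: segment ends here
            have hb : e + 1 = n := by omega
            rw [hseg, if_pos heq, List.drop_succ_cons, List.drop_zero]
            exact ih1 (e + 1) n i r hb
          · rw [hseg, if_neg heq]
            have hdrop : (i :: rest).drop (1 + segLen i rest (eq + 1) ne)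
                = rest.drop (segLen i rest (eq + 1) ne) := by
              simp [Nat.add_comm, List.drop_succ_cons]
            rw [hdrop]
            exact ih2 (e + 1) n i r (eq + 1) ne (by omega) (by omega)
        · rw [if_neg hic]
          have hseg : segLen c (i :: rest) eq ne =
              if eq = ne + 1 then 1 else 1 + segLen c rest eq (ne + 1) := by
            simp [segLen, hic]
          by_cases heq : eq = ne + 1
          · have hb : e = n + 1 := by omega
            rw [hseg, if_pos heq, List.drop_succ_cons, List.drop_zero]
            exact ih1 e (n + 1) c r hb
          · rw [hseg, if_neg heq]
            have hdrop : (i :: rest).drop (1 + segLen c rest eq (ne + 1))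
                = rest.drop (segLen c rest eq (ne + 1)) := by
              simp [Nat.add_comm, List.drop_succ_cons]
            rw [hdrop]
            exact ih2 e (n + 1) c r eq (ne + 1) (by omega) (by omega)

-- ===== VERDICT (by name: the statement is the Claim_ definition above) =====
theorem solution_spec : Claim_equal_solution := by
  intro s _
  unfold Spec_solution solution solution_alt
  exact (main_lemma s.toList).1 0 0 ' ' 0 rfl
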